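-- pv_equiv track=rewrite | github.com/JaydenPahukula/competitive-coding | Codeforces/923/C.py | check
-- ===== SOURCE A (Python) =====
-- def check(a,b,k):
--     countA = 0
--     countB = 0
--     countBoth = 0
--     for i in range(1,k+1):
--         if i in a and i in b:
--             countBoth += 1
--         elif i in a:
--             countA += 1
--         elif i in b:
--             countB += 1
--         else:
--             return "NO"
--     if countA > countB+countBoth:
--         return "NO"
--     if countB > countA+countBoth:
--         return "NO"
--     return "YES"
-- ===== SOURCE B (Python) =====
-- def check(a, b, k):
--     Asel = {x for x in a if 1 <= x <= k}
--     Bsel = {x for x in b if 1 <= x <= k}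
--     if len(Asel | Bsel) != len(range(1, k + 1)):
--         return "NO"
--     both = len(Asel & Bsel)
--     onlyA = len(Asel) - both
--     onlyB = len(Bsel) - both
--     if onlyA > onlyB + both or onlyB > onlyA + both:
--         return "NO"
--     return "YES"
-- ===== Notes on version B (the rewrite author's own statement) =====
-- stated objective: simpler
-- what changed: Replaces the element-by-element loop over range(1,k+1) with its four-way branch, three counters and early NO return by set algebra: restrict set(a) and set(b) to 1..k, decide coverage by comparing the union's size with len(range(1,k+1)), and read the three counts off intersection/difference sizes.
import Mathlib
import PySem

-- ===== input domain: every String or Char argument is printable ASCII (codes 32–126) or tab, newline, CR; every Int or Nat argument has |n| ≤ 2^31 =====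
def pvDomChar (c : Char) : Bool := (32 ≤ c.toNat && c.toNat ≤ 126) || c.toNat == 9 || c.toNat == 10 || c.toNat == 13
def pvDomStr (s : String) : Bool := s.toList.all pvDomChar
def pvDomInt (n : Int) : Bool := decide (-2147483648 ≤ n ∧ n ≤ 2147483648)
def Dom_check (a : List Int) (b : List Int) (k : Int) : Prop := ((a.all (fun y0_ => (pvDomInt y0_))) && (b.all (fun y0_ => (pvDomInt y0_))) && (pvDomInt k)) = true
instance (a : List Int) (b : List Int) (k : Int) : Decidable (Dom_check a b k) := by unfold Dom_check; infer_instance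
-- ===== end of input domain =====

-- B replaces A's element-by-element loop (four-way branch, three counters, early "NO" return) by set algebra: restrict set(a), set(b) to 1..k, compare the union's size for coverage, and read the three counts off intersection/difference sizes; simpler decomposition, same return value.


-- ===== PORT A =====
-- the for-loop over range(1, k+1): three counters, early "NO" return
-- (the range is consumed lazily, as Python's range object is: the recursion counts i upward)
def checkLoop (a b : List Int) (k : Int) (i : Int) (countA countB countBoth : Int) : String :=
  if i < k + 1 then
    if a.contains i && b.contains i then checkLoop a b k (i + 1) countA countB (countBoth + 1)
    else if a.contains i then checkLoop a b k (i + 1) (countA + 1) countB countBoth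
    else if b.contains i then checkLoop a b k (i + 1) countA (countB + 1) countBoth
    else "NO"
  else
    if countA > countB + countBoth then "NO"
    else if countB > countA + countBoth then "NO"
    else "YES"
termination_by (k + 1 - i).toNat
decreasing_by all_goals omega

def check (a : List Int) (b : List Int) (k : Int) : String :=
  checkLoop a b k 1 0 0 0


-- ===== PORT B =====
def check_alt (a : List Int) (b : List Int) (k : Int) : String :=
  let Asel : PySem.Set Int := PySem.Set.ofList (a.filter (fun x => decide (1 ≤ x) && decide (x ≤ k)))
  let Bsel : PySem.Set Int := PySem.Set.ofList (b.filter (fun x => decide (1 ≤ x) && decide (x ≤ k)))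
  -- len(range(1, k+1)) is max k 0, computed in O(1) exactly as Python's len(range) is
  if PySem.Set.len (PySem.Set.union Asel Bsel) ≠ max k 0 then "NO"
  else
    let both := PySem.Set.len (PySem.Set.inter Asel Bsel)
    let onlyA := PySem.Set.len Asel - both
    let onlyB := PySem.Set.len Bsel - both
    if onlyA > onlyB + both || onlyB > onlyA + both then "NO" else "YES"


-- ===== PRECONDITION & SPEC =====
def Spec_check (a : List Int) (b : List Int) (k : Int) (out : String) : Prop := out = check_alt a b k
instance (a : List Int) (b : List Int) (k : Int) (out : String) : Decidable (Spec_check a b k out) := by unfold Spec_check; infer_instance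

-- ===== CLAIM (what is proved, stated in full; the proofs are below) =====
def Claim_equal_check : Prop := ∀ (a : List Int) (b : List Int) (k : Int), Dom_check a b k → Spec_check a b k (check a b k)

-- ===== LEMMAS AND PROOFS =====

def pvVerdict (cA cB cBoth : Int) : String :=
  if cA > cB + cBoth then "NO" else if cB > cA + cBoth then "NO" else "YES"

theorem checkLoop_eq (a b : List Int) (k : Int) :
    ∀ (i cA cB cBoth : Int),
      checkLoop a b k i cA cB cBoth =
        (if (PySem.List.pyRange i (k + 1) 1).all (fun j => a.contains j || b.contains j) then
          pvVerdict
            (cA + ((PySem.List.pyRange i (k + 1) 1).countP (fun j => a.contains j && !b.contains j) : Int))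
            (cB + ((PySem.List.pyRange i (k + 1) 1).countP (fun j => !a.contains j && b.contains j) : Int))
            (cBoth + ((PySem.List.pyRange i (k + 1) 1).countP (fun j => a.contains j && b.contains j) : Int))
        else "NO") := by
  intro i cA cB cBoth
  fun_induction checkLoop a b k i cA cB cBoth with
  | case1 i cA cB cBoth hlt hin ih =>
    rw [PySem.List.pyRange_one_cons (by omega : i < k + 1)]
    by_cases ha : i ∈ a <;> by_cases hb : i ∈ b <;> simp_all <;> ring_nf
  | case2 i cA cB cBoth hlt hni ha ih =>
    rw [PySem.List.pyRange_one_cons (by omega : i < k + 1)]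
    by_cases hbb : i ∈ b <;> simp_all
    ring_nf
  | case3 i cA cB cBoth hlt hni hna hb ih =>
    rw [PySem.List.pyRange_one_cons (by omega : i < k + 1)]
    simp_all
    ring_nf
  | case4 i cA cB cBoth hlt hni hna hnb =>
    rw [PySem.List.pyRange_one_cons (by omega : i < k + 1)]
    simp_all
  | case5 i cA cB cBoth hge h1 =>
    rw [PySem.List.pyRange_one_eq_nil (by omega : k + 1 ≤ i)]
    simp [pvVerdict, h1]
  | case6 i cA cB cBoth hge h1 h2 =>
    rw [PySem.List.pyRange_one_eq_nil (by omega : k + 1 ≤ i)]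
    simp [pvVerdict, h1, h2]
  | case7 i cA cB cBoth hge h1 h2 =>
    rw [PySem.List.pyRange_one_eq_nil (by omega : k + 1 ≤ i)]
    simp [pvVerdict, h1, h2]

theorem pvFinal (nx ny nz : Int) :
    pvVerdict (0 + nx) (0 + ny) (0 + nz) =
      if (nz + nx) - nz > ((nz + ny) - nz) + nz || (nz + ny) - nz > ((nz + nx) - nz) + nz
      then "NO" else "YES" := by
  unfold pvVerdict
  by_cases h1 : ny + nz < nx <;> by_cases h2 : nx + nz < ny <;> simp [h1, h2]

theorem pvLenEq {l1 l2 : List Int} (h1 : l1.Nodup) (h2 : l2.Nodup)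
    (h : ∀ x, x ∈ l1 ↔ x ∈ l2) : l1.length = l2.length :=
  ((List.perm_ext_iff_of_nodup h1 h2).mpr h).length_eq

theorem check_eq_check_alt (a b : List Int) (k : Int) : check a b k = check_alt a b k := by
  simp only [check, check_alt]
  rw [checkLoop_eq]
  set r := PySem.List.pyRange 1 (k + 1) 1 with hr
  have hndr : r.Nodup := PySem.List.nodup_pyRange_one 1 (k + 1)
  have hmem_r : ∀ x : Int, x ∈ r ↔ 1 ≤ x ∧ x ≤ k := by
    intro x; rw [hr, PySem.List.mem_pyRange_one]; omega
  set Asel := PySem.Set.ofList (a.filter (fun x => decide (1 ≤ x) && decide (x ≤ k))) with hAsel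
  set Bsel := PySem.Set.ofList (b.filter (fun x => decide (1 ≤ x) && decide (x ≤ k))) with hBsel
  have hndA : List.Nodup Asel := PySem.Set.nodup_ofList _
  have hndB : List.Nodup Bsel := PySem.Set.nodup_ofList _
  have hmemA : ∀ x, x ∈ Asel ↔ x ∈ a ∧ 1 ≤ x ∧ x ≤ k := by
    intro x; rw [hAsel, PySem.Set.mem_ofList, List.mem_filter]; simp
  have hmemB : ∀ x, x ∈ Bsel ↔ x ∈ b ∧ 1 ≤ x ∧ x ≤ k := by
    intro x; rw [hBsel, PySem.Set.mem_ofList, List.mem_filter]; simp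
  have hlen : ∀ (s : PySem.Set Int) (p : Int → Bool), List.Nodup s →
      (∀ x, x ∈ s ↔ x ∈ r ∧ p x = true) → PySem.Set.len s = (r.countP p : Int) := by
    intro s p hnd hm
    rw [PySem.Set.len_eq, List.countP_eq_length_filter]
    exact congrArg _ (pvLenEq hnd (hndr.filter p) (by intro x; rw [hm x, List.mem_filter]))
  have eA : PySem.Set.len Asel = (r.countP (fun j => a.contains j) : Int) := by
    refine hlen _ _ hndA ?_
    intro x; rw [hmemA x, hmem_r x]; simp; tauto
  have eB : PySem.Set.len Bsel = (r.countP (fun j => b.contains j) : Int) := by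
    refine hlen _ _ hndB ?_
    intro x; rw [hmemB x, hmem_r x]; simp; tauto
  have eU : PySem.Set.len (PySem.Set.union Asel Bsel)
      = (r.countP (fun j => a.contains j || b.contains j) : Int) := by
    refine hlen _ _ (PySem.Set.nodup_union Asel Bsel hndA) ?_
    intro x
    rw [PySem.Set.mem_union, hmemA x, hmemB x, hmem_r x]
    simp; tauto
  have eZ : PySem.Set.len (PySem.Set.inter Asel Bsel)
      = (r.countP (fun j => a.contains j && b.contains j) : Int) := by
    refine hlen _ _ (PySem.Set.nodup_inter Asel Bsel hndA) ?_
    intro x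
    rw [PySem.Set.mem_inter, hmemA x, hmemB x, hmem_r x]
    simp; tauto
  have hrlen : r.length = k.toNat := by
    rw [hr, PySem.List.length_pyRange_one]; omega
  have hcov : (PySem.Set.len (PySem.Set.union Asel Bsel) = max k 0) ↔
      (r.all (fun j => a.contains j || b.contains j) = true) := by
    rw [eU, List.countP_eq_length_filter]
    constructor
    · intro h
      have hle := (List.filter_sublist (l := r) (p := fun j => a.contains j || b.contains j)).length_le
      have hlenF : (r.filter (fun j => a.contains j || b.contains j)).length = r.length := by omega
      have hfe := List.Sublist.eq_of_length
        (List.filter_sublist (l := r) (p := fun j => a.contains j || b.contains j)) hlenF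
      rw [List.all_eq_true]
      intro x hx
      rw [← hfe] at hx
      exact (List.mem_filter.mp hx).2
    · intro h
      have hfe : r.filter (fun j => a.contains j || b.contains j) = r :=
        List.filter_eq_self.mpr (List.all_eq_true.mp h)
      rw [hfe, hrlen]; omega
  by_cases hall : r.all (fun j => a.contains j || b.contains j) = true
  · rw [if_pos hall]
    have hc : ¬(PySem.Set.len (PySem.Set.union Asel Bsel) ≠ max k 0) := by
      simpa using hcov.mpr hall
    rw [if_neg hc]
    have key : ∀ (p q : Int → Bool),
        r.countP (fun x => q x && p x) + r.countP (fun x => !q x && p x) = r.countP p := by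
      intro p q
      have h := List.length_eq_length_filter_add (l := r.filter p) q
      rw [List.filter_filter, List.filter_filter] at h
      simp only [List.countP_eq_length_filter]
      omega
    have eA2 : (r.countP (fun j => a.contains j) : Int)
        = (r.countP (fun j => a.contains j && b.contains j) : Int)
          + (r.countP (fun j => a.contains j && !b.contains j) : Int) := by
      rw [← key (fun x => a.contains x) (fun x => b.contains x)]
      have e1 : (fun x => b.contains x && a.contains x) = (fun x : Int => a.contains x && b.contains x) := by
        funext x; rw [Bool.and_comm]
      have e2 : (fun x => !b.contains x && a.contains x) = (fun x : Int => a.contains x && !b.contains x) := by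
        funext x; rw [Bool.and_comm]
      rw [e1, e2]; push_cast; ring
    have eB2 : (r.countP (fun j => b.contains j) : Int)
        = (r.countP (fun j => a.contains j && b.contains j) : Int)
          + (r.countP (fun j => !a.contains j && b.contains j) : Int) := by
      rw [← key (fun x => b.contains x) (fun x => a.contains x)]
      push_cast; ring
    rw [eA, eB, eZ, eA2, eB2]
    exact pvFinal _ _ _
  · rw [if_neg hall]
    have hc : PySem.Set.len (PySem.Set.union Asel Bsel) ≠ max k 0 := fun h => hall (hcov.mp h)
    rw [if_pos hc]

-- ===== VERDICT (by name: the statement is the Claim_ definition above) =====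
theorem check_spec : Claim_equal_check := by
  intro a b k _
  unfold Spec_check
  exact check_eq_check_alt a b k
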